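-- pv_equiv track=rewrite | github.com/DownToSky/short-problems | project-euler/Euler122.py | binary_exponen
-- ===== SOURCE A (Python) =====
-- def binary_exponen(pow):
-- 	if pow<1:
-- 		raise ValueError("Exopenent should be at least 1")
-- 	if pow is 1:
-- 		return 0
-- 	#The number of steps required in binary exponentiation is related
-- 	#to the binary representaion of the exponent
-- 	#It is related to the number of digits in the bin(num)-1+number of 1's
-- 	#except the first 1
-- 	#e.g.
-- 	#bin(14)=1110-> 2^3+4+2 -> 3+1+1
-- 	bin_rep=str(bin(pow))[2:]
-- 	steps=len(bin_rep)-1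
-- 	for dig in bin_rep[1:]:
-- 		if dig is '1':
-- 			steps+=1
-- 	return steps
-- ===== SOURCE B (Python) =====
-- def binary_exponen(pow):
--     if pow < 1:
--         raise ValueError("Exopenent should be at least 1")
--     return pow.bit_length() - 1 + pow.bit_count() - 1
-- ===== Notes on version B (the rewrite author's own statement) =====
-- stated objective: simpler
-- what changed: Replaces building the binary string and looping over its digits with the closed form bit_length()-1 + bit_count()-1 (no loop, no string, no separate pow==1 branch).
import Mathlib
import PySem

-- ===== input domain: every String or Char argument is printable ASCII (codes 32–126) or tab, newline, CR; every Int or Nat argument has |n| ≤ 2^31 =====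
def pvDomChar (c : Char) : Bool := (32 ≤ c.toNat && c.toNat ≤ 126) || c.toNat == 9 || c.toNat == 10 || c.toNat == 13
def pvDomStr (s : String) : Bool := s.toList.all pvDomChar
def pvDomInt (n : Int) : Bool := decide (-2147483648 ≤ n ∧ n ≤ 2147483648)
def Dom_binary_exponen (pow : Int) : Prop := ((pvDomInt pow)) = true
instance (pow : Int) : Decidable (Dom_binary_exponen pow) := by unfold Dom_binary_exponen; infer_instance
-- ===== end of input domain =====

-- B replaces A's binary-string build and digit loop with the closed form
-- bit_length()-1 + bit_count()-1 (objective: simpler).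

-- ===== PORT A =====
-- str(bin(pow))[2:] for pow ≥ 1 : most-significant bit first
def pvBinStr (n : Nat) : List Char :=
  if n ≤ 1 then ['1']
  else pvBinStr (n / 2) ++ [if n % 2 = 1 then '1' else '0']
decreasing_by omega

def binary_exponen (pow : Int) : Int :=
  if pow < 1 then 0          -- A raises ValueError here; excluded by Pre_
  else if pow = 1 then 0
  else
    let bin_rep := pvBinStr pow.toNat
    let steps : Int := (bin_rep.length : Int) - 1
    bin_rep.tail.foldl (fun s dig => if dig = '1' then s + 1 else s) steps

-- ===== PORT B =====
-- port of int.bit_length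
def pvBitLength : Nat → Nat
  | 0 => 0
  | n + 1 => pvBitLength ((n + 1) / 2) + 1
decreasing_by omega

-- port of int.bit_count (popcount)
def pvBitCount : Nat → Nat
  | 0 => 0
  | n + 1 => pvBitCount ((n + 1) / 2) + (n + 1) % 2
decreasing_by omega

def binary_exponen_alt (pow : Int) : Int :=
  if pow < 1 then 0          -- B raises ValueError here; excluded by Pre_
  else (pvBitLength pow.toNat : Int) - 1 + (pvBitCount pow.toNat : Int) - 1

-- ===== PRECONDITION & SPEC =====
-- Both A and B raise ValueError for pow < 1.
def Pre_binary_exponen (pow : Int) : Prop := 1 ≤ pow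
instance (pow : Int) : Decidable (Pre_binary_exponen pow) := by unfold Pre_binary_exponen; infer_instance
def pvWitness_binary_exponen : Int := 14

def Spec_binary_exponen (pow : Int) (out : Int) : Prop := out = binary_exponen_alt pow
instance (pow : Int) (out : Int) : Decidable (Spec_binary_exponen pow out) := by unfold Spec_binary_exponen; infer_instance

-- ===== CLAIM (what is proved, stated in full; the proofs are below) =====
def Claim_equal_binary_exponen : Prop := ∀ (pow : Int), Dom_binary_exponen pow → Pre_binary_exponen pow → Spec_binary_exponen pow (binary_exponen pow)

-- ===== LEMMAS AND PROOFS =====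

theorem pvBinStr_length (n : Nat) (h : 1 ≤ n) : (pvBinStr n).length = pvBitLength n := by
  induction n using Nat.strong_induction_on with
  | _ n ih =>
    unfold pvBinStr
    match n, h with
    | 1, _ => simp [pvBitLength]
    | Nat.succ (Nat.succ m), _ =>
      have h2 : ¬ (m + 2 ≤ 1) := by omega
      have em : m.succ.succ = m + 2 := rfl
      rw [em]
      simp only [h2, if_false, List.length_append, List.length_cons, List.length_nil]
      rw [ih ((m + 2) / 2) (by omega) (by omega)]
      conv_rhs => rw [show m + 2 = (m + 1) + 1 from rfl, pvBitLength]

theorem pvBinStr_count (n : Nat) (h : 1 ≤ n) : (pvBinStr n).count '1' = pvBitCount n := by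
  induction n using Nat.strong_induction_on with
  | _ n ih =>
    unfold pvBinStr
    match n, h with
    | 1, _ => simp [pvBitCount]
    | Nat.succ (Nat.succ m), _ =>
      have h2 : ¬ (m + 2 ≤ 1) := by omega
      have em : m.succ.succ = m + 2 := rfl
      rw [em]
      simp only [h2, if_false, List.count_append]
      rw [ih ((m + 2) / 2) (by omega) (by omega)]
      conv_rhs => rw [show m + 2 = (m + 1) + 1 from rfl, pvBitCount]
      rcases Nat.mod_two_eq_zero_or_one (m + 2) with h0 | h1
      · simp [h0]
        congr 1
        omega
      · simp [h1]
        congr 1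
        omega

theorem pvBinStr_head (n : Nat) (h : 1 ≤ n) : ∃ t, pvBinStr n = '1' :: t := by
  induction n using Nat.strong_induction_on with
  | _ n ih =>
    unfold pvBinStr
    match n, h with
    | 1, _ => exact ⟨[], rfl⟩
    | Nat.succ (Nat.succ m), _ =>
      have h2 : ¬ (m + 2 ≤ 1) := by omega
      obtain ⟨t, ht⟩ := ih ((m + 2) / 2) (by omega) (by omega)
      refine ⟨t ++ [if (m + 2) % 2 = 1 then '1' else '0'], ?_⟩
      have em : m.succ.succ = m + 2 := rfl
      rw [em]
      simp only [h2, if_false, ht]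
      rfl

theorem pvFoldl_count (l : List Char) (init : Int) :
    l.foldl (fun s dig => if dig = '1' then s + 1 else s) init = init + (l.count '1' : Nat) := by
  induction l generalizing init with
  | nil => simp
  | cons c cs ih =>
    by_cases hc : c = '1'
    · simp [hc, ih]; ring
    · simp [List.foldl, hc, ih]

theorem binary_exponen_spec : Claim_equal_binary_exponen := by
  intro pow _ hpre
  unfold Spec_binary_exponen binary_exponen binary_exponen_alt
  have hlt : ¬ pow < 1 := by exact not_lt.mpr hpre
  simp only [hlt, if_false]
  by_cases h1 : pow = 1
  · subst h1
    have hb : pvBitLength 1 = 1 := by simp [pvBitLength]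
    have hc : pvBitCount 1 = 1 := by simp [pvBitCount]
    norm_num [hb, hc]
  · have h2 : (2 : Nat) ≤ pow.toNat := by omega
    simp only [h1, if_false]
    obtain ⟨t, ht⟩ := pvBinStr_head pow.toNat (by omega)
    have hlen := pvBinStr_length pow.toNat (by omega)
    have hcnt := pvBinStr_count pow.toNat (by omega)
    rw [ht] at hlen hcnt ⊢
    simp only [List.length_cons, List.count_cons, beq_self_eq_true, if_true] at hlen hcnt
    rw [List.tail_cons, pvFoldl_count]
    simp only [List.length_cons]
    omega
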